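-- pv_equiv track=rewrite | github.com/PhilippvK/python-myeda | myeda/myeda.py | map_minterm
-- ===== SOURCE A (Python) =====
-- def map_minterm(n,m,xs):
-- 	mapping={}
-- 	for i,c in enumerate(reversed(bin(m))):
-- 		if (i==n):
-- 			break
-- 		if c=='1':
-- 			mapping[xs[i]]=1
-- 		elif c=='0':
-- 			mapping[xs[i]]=0
-- 		else: # b
-- 			if i<n:
-- 				for j in range(i,n):
-- 					mapping[xs[j]]=0
-- 				break
-- 	return(mapping)
-- ===== SOURCE B (Python) =====
-- def map_minterm(n, m, xs):
--     v = abs(m)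
--     return {xs[i]: (v >> i) & 1 for i in range(n)}
-- ===== Notes on version B (the rewrite author's own statement) =====
-- stated objective: idiomatic
-- what changed: B drops the parsing of the reversed bin() string entirely and computes each bit arithmetically as (abs(m) >> i) & 1 in a single dict comprehension over range(n), instead of A's character loop with an elif chain, a prefix-triggered zero-fill inner loop and break statements.
-- intended difference: For n < 0 (a pathological argument) A's loop runs past the '0b' prefix and returns an accidental dict containing all bits of |m| plus a stray zero entry keyed by xs[bitlen+1] coming from the '0' of the prefix, while B returns the intended empty mapping since there are no variables to map. — e.g. on map_minterm(-1, 0, ["a", "b", "c"]): A returns [("a", 0), ("c", 0)], B returns []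
import Mathlib
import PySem

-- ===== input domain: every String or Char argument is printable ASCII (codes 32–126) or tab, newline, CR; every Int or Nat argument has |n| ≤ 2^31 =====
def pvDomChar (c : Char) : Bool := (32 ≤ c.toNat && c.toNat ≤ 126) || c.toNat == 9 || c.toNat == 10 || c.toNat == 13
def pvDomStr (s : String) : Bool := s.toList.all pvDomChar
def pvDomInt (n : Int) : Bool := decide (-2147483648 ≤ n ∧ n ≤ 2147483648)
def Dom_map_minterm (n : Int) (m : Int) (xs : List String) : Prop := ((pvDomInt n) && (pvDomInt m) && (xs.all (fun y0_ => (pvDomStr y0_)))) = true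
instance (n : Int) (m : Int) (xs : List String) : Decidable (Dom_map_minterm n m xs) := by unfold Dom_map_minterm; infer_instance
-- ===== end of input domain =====

-- B replaces A's character scan of reversed(bin(m)) by the arithmetic bits (abs(m) >> i) & 1
-- over range(n) (more idiomatic); for n < 0 B intentionally returns {} where A leaks prefix
-- artefacts (see D_ below). Equality is about the returned dict (as an assoc list).

-- ===== PORT A =====
-- xs[i]; the `none` (IndexError) case is excluded by Pre_map_minterm, "" is never read there
def pvGetS (xs : List String) (i : Int) : String := (PySem.List.pyGet? xs i).getD ""

-- binary digits of a positive number, least significant first (the digit part of reversed(bin(m)))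
def pvGoBits : Nat → List Char
  | 0 => []
  | w + 1 => (if (w + 1) % 2 = 1 then '1' else '0') :: pvGoBits ((w + 1) / 2)
decreasing_by omega

-- the character sequence of reversed(bin(m)): digits LSB-first, then 'b', then '0', then '-' if negative
def pvRevBin (m : Int) : List Char :=
  (if m.natAbs = 0 then ['0'] else pvGoBits m.natAbs) ++ ['b', '0'] ++ (if m < 0 then ['-'] else [])

-- A's for-loop over enumerate(reversed(bin(m))) with its breaks, literally
def pvAuxA (n : Int) (xs : List String) : Nat → List Char → PySem.Dict String Int → PySem.Dict String Int
  | _, [], acc => acc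
  | i, c :: rest, acc =>
    if (i : Int) = n then acc
    else if c = '1' then pvAuxA n xs (i + 1) rest (acc.insert (pvGetS xs (i : Int)) 1)
    else if c = '0' then pvAuxA n xs (i + 1) rest (acc.insert (pvGetS xs (i : Int)) 0)
    else -- the 'b' (or '-') character
      if (i : Int) < n then
        (PySem.List.pyRange (i : Int) n 1).foldl (fun a j => a.insert (pvGetS xs j) 0) acc
      else pvAuxA n xs (i + 1) rest acc

def map_minterm (n : Int) (m : Int) (xs : List String) : List (String × Int) :=
  (pvAuxA n xs 0 (pvRevBin m) PySem.Dict.empty).items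

-- ===== PORT B =====
-- {xs[i]: (abs(m) >> i) & 1 for i in range(n)}
def map_minterm_alt (n : Int) (m : Int) (xs : List String) : List (String × Int) :=
  ((PySem.List.pyRange 0 n 1).foldl
    (fun d i => d.insert (pvGetS xs i) (((m.natAbs >>> i.toNat) &&& 1 : Nat) : Int))
    PySem.Dict.empty).items

-- ===== PRECONDITION & SPEC =====
-- Pre_ excludes exactly the inputs where A raises IndexError: for n ≥ 0 it reads xs[0..n-1],
-- and for n < 0 it reads xs up to index (number of binary digits of |m|) + 1.
def Pre_map_minterm (n : Int) (m : Int) (xs : List String) : Prop :=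
  (0 ≤ n ∧ n ≤ (xs.length : Int)) ∨ (n < 0 ∧ max 1 (PySem.Int.bitLength m) + 2 ≤ xs.length)
instance (n : Int) (m : Int) (xs : List String) : Decidable (Pre_map_minterm n m xs) := by
  unfold Pre_map_minterm; infer_instance

def pvWitness_map_minterm : Int × Int × List String := (3, 5, ["a", "b", "c"])

-- For n < 0 (a pathological argument) A's loop runs past the '0b' prefix and returns an accidental
-- dict with all bits of |m| plus a stray zero entry keyed by the '0' of the prefix, while B returns
-- the intended empty mapping since there are no variables to map.
def D_map_minterm (n : Int) (m : Int) (xs : List String) : Prop := n < 0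
instance (n : Int) (m : Int) (xs : List String) : Decidable (D_map_minterm n m xs) := by
  unfold D_map_minterm; infer_instance

def Spec_map_minterm (n : Int) (m : Int) (xs : List String) (out : List (String × Int)) : Prop :=
  ¬ D_map_minterm n m xs → out = map_minterm_alt n m xs
instance (n : Int) (m : Int) (xs : List String) (out : List (String × Int)) : Decidable (Spec_map_minterm n m xs out) := by
  unfold Spec_map_minterm; infer_instance

def pvDiffWitness_map_minterm : Int × Int × List String := (-1, 0, ["a", "b", "c"])
def pvDiffWitnessOut_map_minterm : (List (String × Int)) × (List (String × Int)) :=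
  ([("a", 0), ("c", 0)], [])

-- ===== CLAIM (what is proved, stated in full; the proofs are below) =====
def Claim_unchanged_map_minterm : Prop := ∀ (n : Int) (m : Int) (xs : List String), Dom_map_minterm n m xs → Pre_map_minterm n m xs → Spec_map_minterm n m xs (map_minterm n m xs)
def Claim_changed_map_minterm : Prop := Dom_map_minterm (pvDiffWitness_map_minterm.1) (pvDiffWitness_map_minterm.2.1) (pvDiffWitness_map_minterm.2.2) ∧ Pre_map_minterm (pvDiffWitness_map_minterm.1) (pvDiffWitness_map_minterm.2.1) (pvDiffWitness_map_minterm.2.2) ∧ D_map_minterm (pvDiffWitness_map_minterm.1) (pvDiffWitness_map_minterm.2.1) (pvDiffWitness_map_minterm.2.2) ∧ map_minterm (pvDiffWitness_map_minterm.1) (pvDiffWitness_map_minterm.2.1) (pvDiffWitness_map_minterm.2.2) = pvDiffWitnessOut_map_minterm.1 ∧ map_minterm_alt (pvDiffWitness_map_minterm.1) (pvDiffWitness_map_minterm.2.1) (pvDiffWitness_map_minterm.2.2) = pvDiffWitnessOut_map_minterm.2 ∧ pvDiffWitnessOut_map_minterm.1 ≠ pvDiffWitnessOut_map_minterm.2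
def Claim_exact_map_minterm : Prop := ∀ (n : Int) (m : Int) (xs : List String), Dom_map_minterm n m xs → Pre_map_minterm n m xs → D_map_minterm n m xs → map_minterm n m xs ≠ map_minterm_alt n m xs

-- ===== LEMMAS AND PROOFS =====

lemma pv_shift_zero (v : Nat) {i : Nat} {j : Int} (hw : v >>> i = 0) (hij : (i : Int) ≤ j) :
    v >>> j.toNat = 0 := by
  have h1 : i ≤ j.toNat := by omega
  have : v >>> j.toNat = (v >>> i) >>> (j.toNat - i) := by
    rw [← Nat.shiftRight_add]; congr 1; omega
  simp [this, hw]

lemma pv_L (n : Int) (xs : List String) (v : Nat) (tl : List Char) :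
    ∀ w i acc, v >>> i = w → (i : Int) ≤ n →
    pvAuxA n xs i (pvGoBits w ++ 'b' :: '0' :: tl) acc
      = (PySem.List.pyRange (i : Int) n 1).foldl
          (fun d j => d.insert (pvGetS xs j) (((v >>> j.toNat) &&& 1 : Nat) : Int)) acc := by
  intro w
  induction w using Nat.strong_induction_on with
  | _ w IH =>
    intro i acc hw hin
    by_cases hn : (i : Int) = n
    · rw [PySem.List.pyRange_one_eq_nil (le_of_eq hn.symm)]
      cases w <;> simp [pvGoBits, pvAuxA, hn]
    · have hlt : (i : Int) < n := lt_of_le_of_ne hin hn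
      match w with
      | 0 =>
        simp only [pvGoBits, List.nil_append]
        rw [pvAuxA]
        simp only [hn, if_false]
        have hb1 : ('b' = '1') = False := by simp
        have hb0 : ('b' = '0') = False := by simp
        simp only [hb1, hb0, if_false, hlt, if_true]
        apply PySem.List.foldl_congr_mem
        intro acc' j hj
        have hj' := (PySem.List.mem_pyRange_one).1 hj
        rw [pv_shift_zero v hw hj'.1]
        simp
      | w' + 1 =>
        simp only [pvGoBits, List.cons_append]
        rw [pvAuxA]
        simp only [hn, if_false]
        rw [PySem.List.pyRange_one_cons hlt]
        simp only [List.foldl_cons]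
        have htn : ((i : Int)).toNat = i := Int.toNat_natCast i
        have hbit : (v >>> i) &&& 1 = (w' + 1) % 2 := by rw [hw, Nat.and_one_is_mod]
        have hsucc : v >>> (i + 1) = (w' + 1) / 2 := by
          rw [Nat.shiftRight_succ, hw]
        have hcast : (i : Int) + 1 = ((i + 1 : Nat) : Int) := by push_cast; ring
        by_cases hpar : (w' + 1) % 2 = 1
        · simp only [hpar, if_true]
          have hv1 : (((v >>> ((i : Int)).toNat) &&& 1 : Nat) : Int) = 1 := by
            rw [htn, hbit, hpar]; norm_num
          rw [hv1, hcast, IH ((w' + 1) / 2) (by omega) (i + 1) _ hsucc (by omega)]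
        · simp only [hpar, if_false]
          have h10 : ('0' = '1') = False := by simp
          simp only [h10, if_false]
          have hv0 : (((v >>> ((i : Int)).toNat) &&& 1 : Nat) : Int) = 0 := by
            rw [htn, hbit]; omega
          rw [hv0, hcast, IH ((w' + 1) / 2) (by omega) (i + 1) _ hsucc (by omega)]
          rw [if_pos trivial]

lemma pv_L0 (n : Int) (xs : List String) (v : Nat) (tl : List Char) :
    ∀ i acc, v >>> i = 0 → (i : Int) ≤ n →
    pvAuxA n xs i ('0' :: 'b' :: '0' :: tl) acc
      = (PySem.List.pyRange (i : Int) n 1).foldl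
          (fun d j => d.insert (pvGetS xs j) (((v >>> j.toNat) &&& 1 : Nat) : Int)) acc := by
  intro i acc hw hin
  by_cases hn : (i : Int) = n
  · rw [PySem.List.pyRange_one_eq_nil (le_of_eq hn.symm)]
    simp [pvAuxA, hn]
  · have hlt : (i : Int) < n := lt_of_le_of_ne hin hn
    rw [pvAuxA]
    simp only [hn, if_false]
    have h01 : ('0' = '1') = False := by simp
    simp only [h01, if_false]
    have hsucc : v >>> (i + 1) = 0 := by
      rw [Nat.shiftRight_succ, hw]
    have hL := pv_L n xs v tl 0 (i + 1) (acc.insert (pvGetS xs (i : Int)) 0)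
      hsucc (by omega)
    simp only [pvGoBits, List.nil_append] at hL
    rw [show ((i + 1 : Nat) : Int) = (i : Int) + 1 by push_cast; ring] at hL
    rw [PySem.List.pyRange_one_cons hlt]
    simp only [List.foldl_cons]
    have hb : (((v >>> ((i : Int)).toNat) &&& 1 : Nat) : Int) = 0 := by
      rw [Int.toNat_natCast, hw]; simp
    rw [hb]
    exact hL

lemma pv_unchanged (n m : Int) (xs : List String) (hn : 0 ≤ n) :
    map_minterm n m xs = map_minterm_alt n m xs := by
  unfold map_minterm map_minterm_alt pvRevBin
  set v := m.natAbs with hv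
  set tl : List Char := if m < 0 then ['-'] else [] with htl
  by_cases hv0 : v = 0
  · rw [if_pos hv0]
    have hL := pv_L0 n xs v tl 0 PySem.Dict.empty (by simp [hv0]) (by exact_mod_cast hn)
    simp only [Nat.cast_zero] at hL
    simp only [List.cons_append, List.nil_append]
    rw [hL]
  · rw [if_neg hv0]
    have hL := pv_L n xs v tl v 0 PySem.Dict.empty (by simp) (by exact_mod_cast hn)
    simp only [Nat.cast_zero] at hL
    simp only [List.append_assoc, List.cons_append, List.nil_append]
    rw [hL]

lemma pv_insert_items_ne {d : PySem.Dict String Int} (k : String) (v : Int) :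
    (d.insert k v).items ≠ [] := by
  by_cases hc : d.contains k
  · rw [PySem.Dict.items_insert_of_contains _ _ hc]
    have hk : k ∈ d.keys := (PySem.Dict.contains_iff_mem_keys _ _).1 hc
    intro h
    simp only [List.map_eq_nil_iff] at h
    simp [PySem.Dict.keys, h] at hk
  · rw [PySem.Dict.items_insert_of_not_contains _ _ (by simpa using hc)]
    simp

lemma pv_foldl_ne (xs : List String) (l : List Int) (d : PySem.Dict String Int)
    (hd : d.items ≠ []) :
    ((l.foldl (fun a j => a.insert (pvGetS xs j) 0) d).items ≠ []) := by
  induction l generalizing d with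
  | nil => exact hd
  | cons x t ih => exact ih _ (pv_insert_items_ne _ _)

lemma pv_aux_ne (n : Int) (xs : List String) :
    ∀ (cs : List Char) (i : Nat) (acc : PySem.Dict String Int), acc.items ≠ [] →
    (pvAuxA n xs i cs acc).items ≠ [] := by
  intro cs
  induction cs with
  | nil => intro i acc h; simpa [pvAuxA] using h
  | cons c rest ih =>
    intro i acc h
    rw [pvAuxA]
    split_ifs with h1 h2 h3 h4
    · exact h
    · exact ih _ _ (pv_insert_items_ne _ _)
    · exact ih _ _ (pv_insert_items_ne _ _)
    · exact pv_foldl_ne xs _ _ h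
    · exact ih _ _ h

lemma pv_alt_neg (n m : Int) (xs : List String) (hn : n < 0) :
    map_minterm_alt n m xs = [] := by
  unfold map_minterm_alt
  rw [PySem.List.pyRange_one_eq_nil (by omega)]
  rfl

lemma pv_A_neg_ne (n m : Int) (xs : List String) (hn : n < 0) :
    map_minterm n m xs ≠ [] := by
  unfold map_minterm pvRevBin
  by_cases hv0 : m.natAbs = 0
  · rw [if_pos hv0]
    simp only [List.cons_append, List.nil_append]
    rw [pvAuxA]
    have hne : ¬((0 : Nat) : Int) = n := by omega
    rw [if_neg hne, if_neg (by simp : ¬ ('0' = '1')), if_pos rfl]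
    exact pv_aux_ne n xs _ _ _ (pv_insert_items_ne _ _)
  · rw [if_neg hv0]
    obtain ⟨w, hw⟩ : ∃ w, m.natAbs = w + 1 := ⟨m.natAbs - 1, by omega⟩
    rw [hw]
    simp only [pvGoBits, List.append_assoc, List.cons_append, List.nil_append]
    rw [pvAuxA]
    have hne : ¬((0 : Nat) : Int) = n := by omega
    rw [if_neg hne]
    by_cases hp : (w + 1) % 2 = 1
    · rw [if_pos hp, if_pos rfl]
      exact pv_aux_ne n xs _ _ _ (pv_insert_items_ne _ _)
    · rw [if_neg hp, if_neg (by simp : ¬ ('0' = '1')), if_pos rfl]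
      exact pv_aux_ne n xs _ _ _ (pv_insert_items_ne _ _)

-- ===== VERDICT (by name: the statement is the Claim_ definition above) =====
theorem map_minterm_spec : Claim_unchanged_map_minterm := by
  intro n m xs _ _
  unfold Spec_map_minterm D_map_minterm
  intro hd
  exact pv_unchanged n m xs (by omega)
theorem map_minterm_changed : Claim_changed_map_minterm := by
  unfold Claim_changed_map_minterm; decide
theorem map_minterm_tight : Claim_exact_map_minterm := by
  intro n m xs _ _ hd
  unfold D_map_minterm at hd
  rw [pv_alt_neg n m xs hd]
  exact pv_A_neg_ne n m xs hd
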